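-- pv_equiv track=rewrite | github.com/kaushal40/Python-Data-Structure | Two_Dimentional_Array/chess_board_collision.py | rooks_are_safe
-- ===== SOURCE A (Python) =====
-- def rooks_are_safe(input):
--     # row by row traversing
--     for i in range(len(input)): # column length
--         rowCount = 0
--         for j in range(len(input[i])): # row length
--             if input[i][j] == 1:
--                 rowCount += 1
--                 if rowCount > 1:
--                     return False
--                 else:
--                     continue
--
--     for i in range(len(input[0])): # row length
--         rowCount = 0
--         for j in range(len(input)): # column length
--             if input[j][i] == 1: # fix the column increase the row
--                 rowCount += 1
--                 if rowCount > 1: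
--                     return False
--                 else:
--                     continue
--
--     return True
-- ===== SOURCE B (Python) =====
-- def rooks_are_safe(input):
--     seen_rows = set()
--     seen_cols = set()
--     for i, row in enumerate(input):
--         for j, cell in enumerate(row):
--             if cell == 1:
--                 if i in seen_rows or j in seen_cols:
--                     return False
--                 seen_rows.add(i)
--                 seen_cols.add(j)
--     return True
-- ===== Notes on version B (the rewrite author's own statement) =====
-- stated objective: idiomatic
-- what changed: Replaced A's two separate passes (a per-row counting pass plus a per-column counting pass over transposed indices) by a single traversal of the board maintaining seen-row and seen-column sets, failing fast on the first repeated row or column.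
-- outside the precondition, e.g. on rooks_are_safe([[0], [0, 1], [0, 1]]): A returns True, B returns False; on rooks_are_safe([[0], [1, 0]]): A returns True, B returns True; on rooks_are_safe([]): A raises IndexError, B returns True
import Mathlib
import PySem

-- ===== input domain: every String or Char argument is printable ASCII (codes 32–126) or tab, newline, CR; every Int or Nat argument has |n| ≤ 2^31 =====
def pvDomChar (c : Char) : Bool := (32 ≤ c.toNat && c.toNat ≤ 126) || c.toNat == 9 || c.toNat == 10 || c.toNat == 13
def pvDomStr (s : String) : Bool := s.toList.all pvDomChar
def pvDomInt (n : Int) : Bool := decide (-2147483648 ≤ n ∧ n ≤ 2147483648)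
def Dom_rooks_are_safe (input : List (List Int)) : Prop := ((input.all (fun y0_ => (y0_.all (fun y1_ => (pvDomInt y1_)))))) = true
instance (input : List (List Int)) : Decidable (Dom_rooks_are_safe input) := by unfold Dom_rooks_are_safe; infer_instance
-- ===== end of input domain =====

-- B replaces A's two counting passes (per-row, then per-column) by a single traversal
-- maintaining seen-row / seen-column sets (objective: idiomatic single pass; same cost).

-- ===== PORT A =====
-- inner loop 'for j in range(len(input[i])): if input[i][j] == 1: rowCount += 1; if rowCount > 1: return False'
-- returns true iff the 'return False' fires for this row
def pvA_scanRow : List Int → Nat → Bool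
  | [], _ => false
  | x :: xs, c =>
    if x = 1 then (if c + 1 > 1 then true else pvA_scanRow xs (c + 1))
    else pvA_scanRow xs c

-- first 'for i in range(len(input))' loop
def pvA_rowPhase : List (List Int) → Bool
  | [] => false
  | r :: rs => if pvA_scanRow r 0 then true else pvA_rowPhase rs

-- inner loop of the second phase: 'for j in range(len(input)): if input[j][i] == 1: …';
-- Python raises IndexError when row j is shorter than i (excluded by Pre_); pyGetD supplies a default there
def pvA_scanCol : List (List Int) → Nat → Nat → Bool
  | [], _, _ => false
  | r :: rs, i, c =>
    if PySem.List.pyGetD r (i : Int) 0 = 1 then (if c + 1 > 1 then true else pvA_scanCol rs i (c + 1))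
    else pvA_scanCol rs i c

-- second 'for i in range(len(input[0]))' loop, over the column indices
def pvA_colPhase (input : List (List Int)) : List Nat → Bool
  | [] => false
  | i :: is => if pvA_scanCol input i 0 then true else pvA_colPhase input is

def rooks_are_safe (input : List (List Int)) : Bool :=
  if pvA_rowPhase input then false
  else
    match input with
    | [] => false  -- Python raises IndexError on input[0] here; excluded by Pre_
    | r :: _ => if pvA_colPhase input (List.range r.length) then false else true

-- ===== PORT B =====
-- inner 'for j, cell in enumerate(row)' loop of Source B; none = the 'return False'
def pvB_row : List Int → Nat → Nat → PySem.Set Nat → PySem.Set Nat → Option (PySem.Set Nat × PySem.Set Nat)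
  | [], _, _, sr, sc => some (sr, sc)
  | x :: xs, i, j, sr, sc =>
    if x = 1 then
      if PySem.Set.contains sr i || PySem.Set.contains sc j then none
      else pvB_row xs i (j + 1) (PySem.Set.add sr i) (PySem.Set.add sc j)
    else pvB_row xs i (j + 1) sr sc

-- outer 'for i, row in enumerate(input)' loop of Source B
def pvB_go : List (List Int) → Nat → PySem.Set Nat → PySem.Set Nat → Bool
  | [], _, _, _ => true
  | r :: rs, i, sr, sc =>
    match pvB_row r i 0 sr sc with
    | none => false
    | some (sr', sc') => pvB_go rs (i + 1) sr' sc'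

def rooks_are_safe_alt (input : List (List Int)) : Bool :=
  pvB_go input 0 PySem.Set.empty PySem.Set.empty

-- ===== PRECONDITION & SPEC =====
-- Pre_ admits every board on which some row holds two 1s (A answers False in its first loop,
-- never touching input[0]) and every non-empty rectangular board; it excludes the remaining
-- degenerate boards — the empty board, where A raises IndexError on input[0], and ragged boards
-- without a doubled row, where A's column phase either raises IndexError or accidentally checks
-- only the first len(input[0]) columns — malformed input, not part of the task.
def Pre_rooks_are_safe (input : List (List Int)) : Prop :=
  (∃ r ∈ input, 2 ≤ r.count 1) ∨
  (input ≠ [] ∧ ∀ r ∈ input, r.length = (input.headD []).length)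
instance (input : List (List Int)) : Decidable (Pre_rooks_are_safe input) := by
  unfold Pre_rooks_are_safe; infer_instance

def pvWitness_rooks_are_safe : List (List Int) := [[1, 0], [0, 1]]

def Spec_rooks_are_safe (input : List (List Int)) (out : Bool) : Prop := out = rooks_are_safe_alt input
instance (input : List (List Int)) (out : Bool) : Decidable (Spec_rooks_are_safe input out) := by
  unfold Spec_rooks_are_safe; infer_instance

-- ===== CLAIM (what is proved, stated in full; the proofs are below) =====
def Claim_equal_rooks_are_safe : Prop := ∀ (input : List (List Int)), Dom_rooks_are_safe input → Pre_rooks_are_safe input → Spec_rooks_are_safe input (rooks_are_safe input)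

-- ===== LEMMAS AND PROOFS =====

-- number of 1-cells in a row
def pvOnes (r : List Int) : Nat := r.countP (fun x => x == 1)
-- cell (i, j), reading 0 outside the row (irrelevant on rectangular boards)
def pvCell (r : List Int) (j : Nat) : Int := r.getD j 0
-- number of 1-cells in column j
def pvColOnes (rows : List (List Int)) (j : Nat) : Nat := rows.countP (fun r => pvCell r j == 1)

theorem pvA_scanRow_eq (r : List Int) (c : Nat) (hc : c ≤ 1) :
    pvA_scanRow r c = decide (2 ≤ c + pvOnes r) := by
  induction r generalizing c with
  | nil => simp [pvA_scanRow, pvOnes]; omega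
  | cons x xs ih =>
    by_cases hx : x = 1
    · interval_cases c
      · simp only [pvA_scanRow, hx, pvOnes, List.countP_cons]
        simp [ih 1 (by omega), pvOnes]
        rw [show (2 ≤ 1 + List.countP (fun x => x == 1) xs) ↔ 0 < List.countP (fun x => x == 1) xs from by omega, List.countP_pos_iff]
        constructor
        · rintro ⟨a, ha, hb⟩; simp at hb; simpa [hb] using ha
        · intro h; exact ⟨1, h, by simp⟩
      · simp [pvA_scanRow, hx, pvOnes]
        omega
    · simp [pvA_scanRow, hx, ih c hc, pvOnes]

theorem pvA_rowPhase_eq (rows : List (List Int)) :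
    pvA_rowPhase rows = rows.any (fun r => decide (2 ≤ pvOnes r)) := by
  induction rows with
  | nil => simp [pvA_rowPhase]
  | cons r rs ih =>
    rw [pvA_rowPhase, pvA_scanRow_eq r 0 (by omega)]
    by_cases h : 2 ≤ pvOnes r <;> simp [h, ih]

theorem pvA_scanCol_eq (rows : List (List Int)) (i : Nat) (c : Nat) (hc : c ≤ 1) :
    pvA_scanCol rows i c = decide (2 ≤ c + pvColOnes rows i) := by
  induction rows generalizing c with
  | nil => simp [pvA_scanCol, pvColOnes]; omega
  | cons r rs ih =>
    have hg : PySem.List.pyGetD r (i : Int) 0 = pvCell r i := by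
      simp [PySem.List.pyGetD_natCast, pvCell]
    have hcol : pvColOnes (r :: rs) i =
        (if pvCell r i = 1 then 1 else 0) + pvColOnes rs i := by
      by_cases h : pvCell r i = 1 <;> simp [pvColOnes, List.countP_cons, h] <;> omega
    by_cases hx : pvCell r i = 1
    · interval_cases c
      · rw [pvA_scanCol, hg, if_pos hx, if_neg (by omega), ih 1 (by omega),
            decide_eq_decide, hcol, if_pos hx]
        omega
      · rw [pvA_scanCol, hg, if_pos hx, if_pos (by omega)]
        symm
        rw [decide_eq_true_eq, hcol, if_pos hx]
        omega
    · rw [pvA_scanCol, hg, if_neg hx, ih c hc, decide_eq_decide, hcol, if_neg hx]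
      omega

theorem pvA_colPhase_eq (input : List (List Int)) (is : List Nat) :
    pvA_colPhase input is = is.any (fun i => decide (2 ≤ pvColOnes input i)) := by
  induction is with
  | nil => simp [pvA_colPhase]
  | cons i is ih =>
    rw [pvA_colPhase, pvA_scanCol_eq input i 0 (by omega)]
    by_cases h : 2 ≤ pvColOnes input i <;> simp [h, ih]

-- B's inner loop once the current row index has been added to seen_rows: any further 1 aborts
theorem pvB_row_seen (r : List Int) (i j : Nat) (sr sc : PySem.Set Nat)
    (hi : PySem.Set.contains sr i = true) :
    pvB_row r i j sr sc = if pvOnes r = 0 then some (sr, sc) else none := by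
  induction r generalizing j with
  | nil => simp [pvB_row, pvOnes]
  | cons x xs ih =>
    by_cases hx : x = 1
    · rw [pvB_row, if_pos hx, if_pos (by rw [hi]; simp)]
      rw [if_neg (by simp [pvOnes, List.countP_cons, hx])]
    · rw [pvB_row, if_neg hx, ih (j + 1)]
      simp [pvOnes, List.countP_cons, hx]

-- B's inner loop when the current row index is fresh
theorem pvB_row_fresh (r : List Int) (i j : Nat) (sr sc : PySem.Set Nat)
    (hi : PySem.Set.contains sr i = false) :
    pvB_row r i j sr sc =
      match r.findIdx? (fun x => x == 1) with
      | none => some (sr, sc)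
      | some t =>
        if PySem.Set.contains sc (j + t) then none
        else if 0 < pvOnes (r.drop (t + 1)) then none
        else some (PySem.Set.add sr i, PySem.Set.add sc (j + t)) := by
  induction r generalizing j with
  | nil => simp [pvB_row]
  | cons x xs ih =>
    by_cases hx : x = 1
    · have hadd : PySem.Set.contains (PySem.Set.add sr i) i = true := by
        simp [PySem.Set.contains_iff, PySem.Set.mem_add]
      have hfi : (x :: xs).findIdx? (fun y => y == 1) = some 0 := by
        simp [List.findIdx?_cons, hx]
      rw [pvB_row, if_pos hx]
      simp only [hfi, Nat.add_zero, List.drop_succ_cons, List.drop_zero, hi, Bool.false_or]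
      by_cases hsc : PySem.Set.contains sc j = true
      · rw [if_pos hsc, if_pos hsc]
      · rw [Bool.not_eq_true] at hsc
        rw [if_neg (by simpa using hsc), if_neg (by simpa using hsc)]
        rw [pvB_row_seen xs i (j + 1) _ _ hadd]
        by_cases hz : pvOnes xs = 0
        · rw [if_pos hz, if_neg (by omega)]
        · rw [if_neg hz, if_pos (by omega)]
    · have hfi : (x :: xs).findIdx? (fun y => y == 1) =
          ((xs).findIdx? (fun y => y == 1)).map (· + 1) := by
        simp [List.findIdx?_cons, hx]
      rw [pvB_row, if_neg hx, ih (j + 1)]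
      simp only [hfi]
      cases hf : xs.findIdx? (fun y => y == 1) with
      | none => simp
      | some t => simp [List.drop_succ_cons, Nat.add_assoc, Nat.add_comm 1 t]

-- splitting the 1-count of a row at its first 1
theorem pvOnes_split (r : List Int) (t : Nat) (ht : t < r.length)
    (h1 : (r[t]'ht) = 1) (hmin : ∀ s (hs : s < t), ¬ ((r[s]'(by omega)) = 1)) :
    pvOnes r = 1 + pvOnes (r.drop (t + 1)) := by
  conv_lhs => rw [pvOnes, ← List.take_append_drop t r]
  rw [List.countP_append]
  have htk : List.countP (fun x => x == 1) (r.take t) = 0 := by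
    rw [List.countP_eq_zero]
    intro x hx
    rw [List.mem_take_iff_getElem] at hx
    obtain ⟨s, hs, rfl⟩ := hx
    simpa using hmin s (by omega)
  have hdr : r.drop t = (r[t]'ht) :: r.drop (t + 1) := (List.getElem_cons_drop ht).symm
  rw [htk, hdr, List.countP_cons]
  simp [h1, pvOnes]
  omega

-- when the row's only 1 is at position t, the cell predicate is "j = t"
theorem pvCell_spec (r : List Int) (t : Nat) (ht : t < r.length)
    (h1 : (r[t]'ht) = 1) (hmin : ∀ s (hs : s < t), ¬ ((r[s]'(by omega)) = 1))
    (hdrop : pvOnes (r.drop (t + 1)) = 0) :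
    ∀ j, pvCell r j = 1 ↔ j = t := by
  intro j
  constructor
  · intro hc
    by_contra hne
    by_cases hj : j < r.length
    · have hcell : (r[j]'hj) = 1 := by
        simpa [pvCell, List.getD_eq_getElem?_getD, List.getElem?_eq_getElem hj] using hc
      rcases Nat.lt_trichotomy j t with h | h | h
      · exact hmin j h hcell
      · exact hne h
      · have hmem : (r[j]'hj) ∈ r.drop (t + 1) := by
          rw [List.mem_iff_getElem]
          exact ⟨j - (t + 1), by rw [List.length_drop]; omega, by rw [List.getElem_drop]; congr 1; omega⟩
        rw [pvOnes, List.countP_eq_zero] at hdrop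
        exact hdrop _ hmem (by simp [hcell])
    · simp [pvCell, List.getD_eq_getElem?_getD, List.getElem?_eq_none (by omega : r.length ≤ j)] at hc
  · rintro rfl
    simpa [pvCell, List.getD_eq_getElem?_getD, List.getElem?_eq_getElem ht] using h1

theorem pvColOnes_cons (r : List Int) (rs : List (List Int)) (j : Nat) :
    pvColOnes (r :: rs) j = (if pvCell r j = 1 then 1 else 0) + pvColOnes rs j := by
  by_cases h : pvCell r j = 1 <;> simp [pvColOnes, List.countP_cons, h] <;> omega

def pvGood (rows : List (List Int)) (sc : PySem.Set Nat) : Prop :=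
  (∀ r ∈ rows, pvOnes r ≤ 1) ∧
  (∀ j, PySem.Set.contains sc j = true → pvColOnes rows j = 0) ∧
  (∀ j, pvColOnes rows j ≤ 1)

theorem pvB_go_iff (rows : List (List Int)) (i : Nat) (sr sc : PySem.Set Nat)
    (hsr : ∀ k, PySem.Set.contains sr k = true → k < i) :
    pvB_go rows i sr sc = true ↔ pvGood rows sc := by
  induction rows generalizing i sr sc with
  | nil => simp [pvB_go, pvGood, pvColOnes]
  | cons r rs ih =>
    have hfresh : PySem.Set.contains sr i = false := by
      by_contra h
      rw [Bool.not_eq_false] at h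
      exact absurd (hsr i h) (by omega)
    rw [pvB_go, pvB_row_fresh r i 0 sr sc hfresh]
    cases hf : r.findIdx? (fun x => x == 1) with
    | none =>
      have hnone := List.findIdx?_eq_none_iff.mp hf
      have hones : pvOnes r = 0 := by
        rw [pvOnes, List.countP_eq_zero]; exact fun a ha => by simp [hnone a ha]
      have hcell : ∀ j, ¬ (pvCell r j = 1) := by
        intro j hc
        by_cases hj : j < r.length
        · have : (r[j]'hj) = 1 := by
            simpa [pvCell, List.getD_eq_getElem?_getD, List.getElem?_eq_getElem hj] using hc
          simpa [this] using hnone _ (List.getElem_mem hj)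
        · simp [pvCell, List.getD_eq_getElem?_getD, List.getElem?_eq_none (by omega : r.length ≤ j)] at hc
      rw [ih (i + 1) sr sc (fun k hk => by have := hsr k hk; omega)]
      unfold pvGood
      have hcol : ∀ j, pvColOnes (r :: rs) j = pvColOnes rs j := by
        intro j; rw [pvColOnes_cons, if_neg (hcell j)]; omega
      constructor
      · rintro ⟨c1, c2, c3⟩
        exact ⟨by intro r' hr'; rcases List.mem_cons.mp hr' with rfl | hr''; exacts [by omega, c1 r' hr''],
               fun j hj => by rw [hcol]; exact c2 j hj,
               fun j => by rw [hcol]; exact c3 j⟩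
      · rintro ⟨c1, c2, c3⟩
        exact ⟨fun r' hr' => c1 r' (by simp [hr']),
               fun j hj => by have := c2 j hj; rwa [hcol] at this,
               fun j => by have := c3 j; rwa [hcol] at this⟩
    | some t =>
      obtain ⟨ht, h1, hmin⟩ := List.findIdx?_eq_some_iff_getElem.mp hf
      have h1' : (r[t]'ht) = 1 := by simpa using h1
      have hmin' : ∀ s (hs : s < t), ¬ ((r[s]'(by omega)) = 1) := by
        intro s hs hc; exact absurd (by simpa using hmin s hs) (by simp [hc])
      have hcellt : pvCell r t = 1 := by
        simpa [pvCell, List.getD_eq_getElem?_getD, List.getElem?_eq_getElem ht] using h1'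
      simp only [Nat.zero_add]
      by_cases hsc : PySem.Set.contains sc t = true
      · rw [if_pos hsc]
        simp only [Bool.false_eq_true, false_iff]
        rintro ⟨c1, c2, c3⟩
        have := c2 t hsc
        rw [pvColOnes_cons, if_pos hcellt] at this
        omega
      · rw [Bool.not_eq_true] at hsc
        rw [if_neg (by simpa using hsc)]
        by_cases hdrop : 0 < pvOnes (r.drop (t + 1))
        · rw [if_pos hdrop]
          simp only [Bool.false_eq_true, false_iff]
          rintro ⟨c1, c2, c3⟩
          have := c1 r (by simp)
          rw [pvOnes_split r t ht h1' hmin'] at this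
          omega
        · rw [if_neg hdrop]
          have hdrop0 : pvOnes (r.drop (t + 1)) = 0 := by omega
          have hcell := pvCell_spec r t ht h1' hmin' hdrop0
          have hones1 : pvOnes r = 1 := by
            rw [pvOnes_split r t ht h1' hmin', hdrop0]
          have hsr' : ∀ k, PySem.Set.contains (PySem.Set.add sr i) k = true → k < i + 1 := by
            intro k hk
            rw [PySem.Set.contains_iff, PySem.Set.mem_add] at hk
            rcases hk with hk | rfl
            · have := hsr k (by rwa [PySem.Set.contains_iff]); omega
            · omega
          rw [ih (i + 1) _ _ hsr']
          unfold pvGood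
          have hcol : ∀ j, pvColOnes (r :: rs) j = (if j = t then 1 else 0) + pvColOnes rs j := by
            intro j
            rw [pvColOnes_cons]
            by_cases hj : j = t
            · rw [if_pos hj, if_pos ((hcell j).mpr hj)]
            · rw [if_neg hj, if_neg (fun hc => hj ((hcell j).mp hc))]
          have hmem : ∀ j, PySem.Set.contains (PySem.Set.add sc t) j = true ↔
              (PySem.Set.contains sc j = true ∨ j = t) := by
            intro j
            rw [PySem.Set.contains_iff, PySem.Set.mem_add, PySem.Set.contains_iff]
          constructor
          · rintro ⟨c1, c2, c3⟩
            refine ⟨by intro r' hr'; rcases List.mem_cons.mp hr' with rfl | hr''; exacts [by omega, c1 r' hr''], ?_, ?_⟩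
            · intro j hj
              have hrs0 : pvColOnes rs j = 0 := c2 j ((hmem j).mpr (Or.inl hj))
              have hjt : j ≠ t := fun h => by rw [h] at hj; rw [hj] at hsc; cases hsc
              rw [hcol, if_neg hjt, hrs0]
            · intro j
              rw [hcol]
              by_cases hj : j = t
              · have := c2 j ((hmem j).mpr (Or.inr hj)); rw [if_pos hj]; omega
              · have := c3 j; rw [if_neg hj]; omega
          · rintro ⟨c1, c2, c3⟩
            refine ⟨fun r' hr' => c1 r' (by simp [hr']), ?_, ?_⟩
            · intro j hj
              rcases (hmem j).mp hj with hj' | rfl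
              · have := c2 j hj'
                have hjt : j ≠ t := fun h => by rw [h] at hj'; rw [hj'] at hsc; cases hsc
                rw [hcol, if_neg hjt] at this; omega
              · have := c3 j; rw [hcol, if_pos rfl] at this; omega
            · intro j
              have := c3 j
              rw [hcol] at this
              omega

theorem pvAlt_iff (input : List (List Int)) :
    rooks_are_safe_alt input = true ↔
      (∀ r ∈ input, pvOnes r ≤ 1) ∧ (∀ j, pvColOnes input j ≤ 1) := by
  rw [rooks_are_safe_alt,
      pvB_go_iff input 0 _ _ (fun k hk => by simp [PySem.Set.contains_iff, PySem.Set.empty] at hk)]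
  unfold pvGood
  constructor
  · rintro ⟨c1, c2, c3⟩; exact ⟨c1, c3⟩
  · rintro ⟨c1, c3⟩
    exact ⟨c1, fun j hj => by simp [PySem.Set.contains_iff, PySem.Set.empty] at hj, c3⟩

-- ===== VERDICT (by name: the statement is the Claim_ definition above) =====
theorem pvCount_eq_ones (r : List Int) : r.count 1 = pvOnes r := by
  simp [pvOnes, List.count_eq_countP]

theorem rooks_are_safe_spec : Claim_equal_rooks_are_safe := by
  intro input _hdom hpre
  unfold Spec_rooks_are_safe
  rcases hpre with ⟨r, hr, h2⟩ | hpre'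
  · -- some row holds two 1s: both programs answer False
    rw [pvCount_eq_ones] at h2
    have hrow : pvA_rowPhase input = true := by
      rw [pvA_rowPhase_eq, List.any_eq_true]
      exact ⟨r, hr, by simpa using by omega⟩
    have hAlt : rooks_are_safe_alt input = false := by
      rw [← Bool.not_eq_true, pvAlt_iff]
      rintro ⟨c1, -⟩
      exact absurd (c1 r hr) (by omega)
    rw [rooks_are_safe.eq_def, if_pos hrow, hAlt]
  · obtain ⟨hne, hrect⟩ := hpre'
    obtain ⟨r0, rs, rfl⟩ := List.exists_cons_of_ne_nil hne
    have hw : ∀ r ∈ r0 :: rs, r.length = r0.length := by simpa using hrect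
    -- A's value as a predicate
    rw [rooks_are_safe, pvA_rowPhase_eq, pvA_colPhase_eq]
    -- columns at index ≥ r0.length are empty on a rectangular board
    have hbig : ∀ j, r0.length ≤ j → pvColOnes (r0 :: rs) j = 0 := by
      intro j hj
      rw [pvColOnes, List.countP_eq_zero]
      intro r hr
      have hlen : r.length = r0.length := hw r hr
      simp [pvCell, List.getD_eq_getElem?_getD, List.getElem?_eq_none (by omega : r.length ≤ j)]
    by_cases hA : (∀ r ∈ r0 :: rs, pvOnes r ≤ 1) ∧ (∀ j, pvColOnes (r0 :: rs) j ≤ 1)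
    · have h1 : ((r0 :: rs).any fun r => decide (2 ≤ pvOnes r)) = false := by
        simp only [List.any_eq_false]
        intro r hr
        simpa using by have := hA.1 r hr; omega
      have h2 : ((List.range r0.length).any fun i => decide (2 ≤ pvColOnes (r0 :: rs) i)) = false := by
        simp only [List.any_eq_false]
        intro i _
        simpa using by have := hA.2 i; omega
      rw [h1, h2]
      simp [(pvAlt_iff (r0 :: rs)).mpr hA]
    · have hAlt : rooks_are_safe_alt (r0 :: rs) = false := by
        rw [← Bool.not_eq_true, pvAlt_iff]
        exact hA
      rw [hAlt]
      rcases not_and_or.mp hA with h | h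
      · push_neg at h
        obtain ⟨r, hr, hones⟩ := h
        have : ((r0 :: rs).any fun r => decide (2 ≤ pvOnes r)) = true := by
          rw [List.any_eq_true]
          exact ⟨r, hr, by simpa using by omega⟩
        rw [this]
        rfl
      · push_neg at h
        obtain ⟨j, hj⟩ := h
        have hjlt : j < r0.length := by
          by_contra hge
          have := hbig j (by omega)
          omega
        have h2 : ((List.range r0.length).any fun i => decide (2 ≤ pvColOnes (r0 :: rs) i)) = true := by
          rw [List.any_eq_true]
          exact ⟨j, List.mem_range.mpr hjlt, by simpa using by omega⟩
        rw [h2]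
        split <;> rfl
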